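-- pv_equiv track=rewrite | github.com/awsdevs/codebert-repo-chunker | codebert-repo-chunker/src/chunkers/config/yaml_chunker.py | _find_document_start
-- ===== SOURCE A (Python) =====
-- def _find_document_start(content: str, doc_index: int) -> int:
--     """Find start line of document"""
--     if doc_index == 0:
--         return 0
--
--     # Look for document separator
--     separator_count = 0
--     lines = content.split('\n')
--
--     for i, line in enumerate(lines):
--         if line.strip() == '---':
--             if separator_count == doc_index - 1:
--                 return i + 1
--             separator_count += 1
--
--     return 0
-- ===== SOURCE B (Python) =====
-- def _step(state: int, ch: str) -> int:
--     """DFA transition for one non-newline character.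
--     States: 0 leading whitespace, 1-3 inside the dash run (count of dashes),
--     4 trailing whitespace after exactly three dashes, 5 dead (line cannot
--     strip to '---')."""
--     if state == 5:
--         return 5
--     if ch == '-':
--         return state + 1 if state < 3 else 5
--     if ch in ' \t\r':
--         return 5 if state in (1, 2) else (4 if state == 3 else state)
--     return 5
--
--
-- def _find_document_start(content: str, doc_index: int) -> int:
--     """Find start line of document"""
--     if doc_index == 0:
--         return 0
--     need = doc_index - 1
--     seen = 0
--     line = 0
--     state = 0
--     for ch in content:
--         if ch == '\n':
--             if state == 3 or state == 4:
--                 if seen == need: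
--                     return line + 1
--                 seen += 1
--             line += 1
--             state = 0
--         else:
--             state = _step(state, ch)
--     if (state == 3 or state == 4) and seen == need:
--         return line + 1
--     return 0
-- ===== Notes on version B (the rewrite author's own statement) =====
-- stated objective: alternative
-- what changed: Replaces A's split-into-lines-then-scan-with-a-running-counter by a single character-level pass over the raw string: a 6-state DFA decides incrementally whether the current line strips to '---', so no line list or per-line strip() is ever built.
import Mathlib
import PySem

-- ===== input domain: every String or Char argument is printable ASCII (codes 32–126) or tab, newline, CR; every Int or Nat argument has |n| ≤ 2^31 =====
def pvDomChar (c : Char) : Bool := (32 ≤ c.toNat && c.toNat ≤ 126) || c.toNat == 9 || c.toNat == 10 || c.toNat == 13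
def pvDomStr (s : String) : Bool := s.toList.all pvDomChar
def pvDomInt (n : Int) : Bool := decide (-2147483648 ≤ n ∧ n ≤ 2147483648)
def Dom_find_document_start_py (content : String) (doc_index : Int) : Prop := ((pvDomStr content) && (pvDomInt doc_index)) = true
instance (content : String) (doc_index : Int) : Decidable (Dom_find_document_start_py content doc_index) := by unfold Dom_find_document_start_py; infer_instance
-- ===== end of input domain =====

-- B replaces A's split-into-lines + per-line strip scan by one character-level pass
-- with a 6-state DFA recognising lines that strip to '---' (alternative algorithm, same cost).

-- ===== PORT A =====
-- the for-loop over enumerate(content.split('\n')) with separator_count state and early return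
def pvALoop : List (List Char) → Int → Int → Int → Int
  | [], _, _, _ => 0
  | line :: rest, i, sepc, di =>
      if PySem.Chars.strip line == ['-', '-', '-'] then
        if sepc == di - 1 then i + 1
        else pvALoop rest (i + 1) (sepc + 1) di
      else pvALoop rest (i + 1) sepc di

def find_document_start_py (content : String) (doc_index : Int) : Int :=
  if doc_index == 0 then 0
  else pvALoop (PySem.Chars.splitOn content.toList ['\n']) 0 0 doc_index

-- ===== PORT B =====
-- _step: DFA transition for one non-newline character (states: 0 leading ws,
-- 1-3 dash run, 4 trailing ws after three dashes, 5 dead)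
def pvStep (state : Int) (ch : Char) : Int :=
  if state == 5 then 5
  else if ch == '-' then (if state < 3 then state + 1 else 5)
  else if ch == ' ' || ch == '\t' || ch == '\r' then
    (if state == 1 || state == 2 then 5 else if state == 3 then 4 else state)
  else 5

-- the for-loop of B over the characters of content
def pvBLoop : List Char → Int → Int → Int → Int → Int
  | [], need, seen, line, state =>
      if (state == 3 || state == 4) && seen == need then line + 1 else 0
  | ch :: rest, need, seen, line, state =>
      if ch == '\n' then
        if state == 3 || state == 4 then
          if seen == need then line + 1
          else pvBLoop rest need (seen + 1) (line + 1) 0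
        else pvBLoop rest need seen (line + 1) 0
      else pvBLoop rest need seen line (pvStep state ch)

def find_document_start_py_alt (content : String) (doc_index : Int) : Int :=
  if doc_index == 0 then 0
  else pvBLoop content.toList (doc_index - 1) 0 0 0

-- ===== PRECONDITION & SPEC =====
def Spec_find_document_start_py (content : String) (doc_index : Int) (out : Int) : Prop := out = find_document_start_py_alt content doc_index
instance (content : String) (doc_index : Int) (out : Int) : Decidable (Spec_find_document_start_py content doc_index out) := by unfold Spec_find_document_start_py; infer_instance

-- ===== CLAIM (what is proved, stated in full; the proofs are below) =====
def Claim_equal_find_document_start_py : Prop := ∀ (content : String) (doc_index : Int), Dom_find_document_start_py content doc_index → Spec_find_document_start_py content doc_index (find_document_start_py content doc_index)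

-- ===== LEMMAS AND PROOFS =====

-- whitespace characters B's DFA strips (= Python whitespace within Dom, minus '\n')
def pvWsb (c : Char) : Bool := c == ' ' || c == '\t' || c == '\r'

-- the acceptance predicate both sides are reduced to:
-- "after dropping leading ws: exactly three dashes, then only ws"
def pvDashRun : Nat → List Char → Bool
  | 0, t => t.all pvWsb
  | _ + 1, [] => false
  | k + 1, c :: t => if c = '-' then pvDashRun k t else false

def pvSepB (m : List Char) : Bool := pvDashRun 3 (m.dropWhile pvWsb)

-- simple recursive characterisation of content.split('\n')
def pvSplitNL : List Char → List (List Char)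
  | [] => [[]]
  | c :: cs =>
      if c = '\n' then [] :: pvSplitNL cs
      else
        match pvSplitNL cs with
        | [] => [[c]]
        | h :: t => (c :: h) :: t

theorem pvSplitNL_ne_nil (cs : List Char) : pvSplitNL cs ≠ [] := by
  cases cs with
  | nil => simp [pvSplitNL]
  | cons c cs =>
    simp only [pvSplitNL]
    split
    · simp
    · split <;> simp

theorem pvGo_eq (cs : List Char) : ∀ (fuel : Nat) (cur : List Char) (acc : List (List Char)),
    cs.length ≤ fuel →
    PySem.Chars.splitOn.go ['\n'] fuel cs cur acc =
      acc.reverse ++ (cur.reverse ++ (pvSplitNL cs).headD []) :: (pvSplitNL cs).tail := by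
  induction cs with
  | nil =>
    intro fuel cur acc _
    cases fuel <;> simp [PySem.Chars.splitOn.go, pvSplitNL]
  | cons c cs ih =>
    intro fuel cur acc hf
    cases fuel with
    | zero => simp at hf
    | succ f =>
      have hf' : cs.length ≤ f := by simpa using hf
      simp only [PySem.Chars.splitOn.go]
      by_cases hc : c = '\n'
      · subst hc
        rw [if_pos (by simp [List.isPrefixOf])]
        rw [show List.drop (List.length ['\n']) ('\n' :: cs) = cs by simp]
        rw [ih f [] (cur.reverse :: acc) hf']
        simp only [pvSplitNL, List.headD, List.tail, List.reverse_cons,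
          List.append_assoc, List.singleton_append]
        rcases hsp : pvSplitNL cs with _ | ⟨h, t⟩
        · exact absurd hsp (pvSplitNL_ne_nil cs)
        · simp
      · rw [if_neg (by simp [List.isPrefixOf]; exact fun h => absurd h.symm hc)]
        rw [ih f (c :: cur) acc hf']
        simp only [pvSplitNL, if_neg hc]
        rcases hsp : pvSplitNL cs with _ | ⟨h, t⟩
        · exact absurd hsp (pvSplitNL_ne_nil cs)
        · simp

theorem pvSplitOn_eq (cs : List Char) :
    PySem.Chars.splitOn cs ['\n'] = pvSplitNL cs := by
  unfold PySem.Chars.splitOn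
  rw [pvGo_eq cs (cs.length + 1) [] [] (by omega)]
  rcases hsp : pvSplitNL cs with _ | ⟨h, t⟩
  · exact absurd hsp (pvSplitNL_ne_nil cs)
  · simp

theorem pvSplitNL_no_nl (cs : List Char) (h : ∀ c ∈ cs, c ≠ '\n') :
    pvSplitNL cs = [cs] := by
  induction cs with
  | nil => rfl
  | cons c cs ih =>
    simp only [pvSplitNL, if_neg (h c (by simp))]
    rw [ih (fun x hx => h x (by simp [hx]))]

theorem pvSplitNL_append_nl (l cs : List Char) (h : ∀ c ∈ l, c ≠ '\n') :
    pvSplitNL (l ++ '\n' :: cs) = l :: pvSplitNL cs := by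
  induction l with
  | nil => simp [pvSplitNL]
  | cons c l ih =>
    simp only [List.cons_append, pvSplitNL, if_neg (h c (by simp))]
    rw [ih (fun x hx => h x (by simp [hx]))]

-- B's loop over a newline-free prefix only folds the DFA state
theorem pvBLoop_no_nl (l : List Char) (h : ∀ c ∈ l, c ≠ '\n') :
    ∀ (rest : List Char) (need seen line state : Int),
    pvBLoop (l ++ rest) need seen line state =
      pvBLoop rest need seen line (l.foldl pvStep state) := by
  induction l with
  | nil => intro rest need seen line state; rfl
  | cons c l ih =>
    intro rest need seen line state
    have hc : (c == '\n') = false := by simpa using h c (by simp)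
    simp only [List.cons_append, pvBLoop, hc, Bool.false_eq_true, if_false, List.foldl_cons]
    exact ih (fun x hx => h x (by simp [hx])) rest need seen line (pvStep state c)

-- char-equality to code-point equality
theorem pvBeq_toNat (c d : Char) : (c == d) = decide (c.toNat = d.toNat) := by
  by_cases h : c = d
  · simp [h]
  · have : c.toNat ≠ d.toNat := fun hn => h (Char.ext (UInt32.toNat_inj.mp hn))
    simp [h, this]

-- DFA transition facts
theorem pvStep_ws (s : Int) (c : Char) (hs : s = 0 ∨ s = 4) (hw : pvWsb c = true) :
    pvStep s c = s := by
  rcases (by simpa [pvWsb, or_assoc] using hw : c = ' ' ∨ c = '\t' ∨ c = '\r') with h | h | h <;>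
    rcases hs with hs | hs <;> subst hs <;> subst h <;> decide

theorem pvStep_ws3 (c : Char) (hw : pvWsb c = true) : pvStep 3 c = 4 := by
  rcases (by simpa [pvWsb, or_assoc] using hw : c = ' ' ∨ c = '\t' ∨ c = '\r') with h | h | h <;>
    subst h <;> decide

theorem pvStep_ws12 (s : Int) (c : Char) (hs : s = 1 ∨ s = 2) (hw : pvWsb c = true) :
    pvStep s c = 5 := by
  rcases (by simpa [pvWsb, or_assoc] using hw : c = ' ' ∨ c = '\t' ∨ c = '\r') with h | h | h <;>
    rcases hs with hs | hs <;> subst hs <;> subst h <;> decide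

theorem pvStep_dash (s : Int) (hs : s = 0 ∨ s = 1 ∨ s = 2) : pvStep s '-' = s + 1 := by
  rcases hs with h | h | h <;> subst h <;> decide

theorem pvStep_dash34 (s : Int) (hs : s = 3 ∨ s = 4) : pvStep s '-' = 5 := by
  rcases hs with h | h <;> subst h <;> decide

theorem pvStep_other (s : Int) (c : Char) (hs : s ≠ 5) (hd : c ≠ '-') (hw : pvWsb c = false) :
    pvStep s c = 5 := by
  simp only [pvWsb, Bool.or_eq_false_iff, beq_eq_false_iff_ne, ne_eq] at hw
  obtain ⟨⟨h1, h2⟩, h3⟩ := hw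
  simp [pvStep, hs, hd, h1, h2, h3]

theorem pvFold5 (l : List Char) : l.foldl pvStep 5 = 5 := by
  induction l with
  | nil => rfl
  | cons c l ih => simpa [pvStep] using ih

theorem pvAccept5 (l : List Char) :
    (l.foldl pvStep 5 == 3 || l.foldl pvStep 5 == 4) = false := by
  rw [pvFold5]; rfl

theorem pvAccept4 (l : List Char) :
    (l.foldl pvStep 4 == 3 || l.foldl pvStep 4 == 4) = l.all pvWsb := by
  induction l with
  | nil => rfl
  | cons c l ih =>
    by_cases hw : pvWsb c = true
    · simp only [List.foldl_cons, pvStep_ws 4 c (by omega) hw, List.all_cons, hw, Bool.true_and, ih]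
    · have hw' : pvWsb c = false := by simpa using hw
      by_cases hd : c = '-'
      · subst hd
        rw [List.foldl_cons, pvStep_dash34 4 (by omega), pvAccept5]
        simp [hw']
      · rw [List.foldl_cons, pvStep_other 4 c (by omega) hd hw', pvAccept5]
        simp [hw']

theorem pvAccept3 (l : List Char) :
    (l.foldl pvStep 3 == 3 || l.foldl pvStep 3 == 4) = l.all pvWsb := by
  cases l with
  | nil => rfl
  | cons c l =>
    by_cases hw : pvWsb c = true
    · rw [List.foldl_cons, pvStep_ws3 c hw, pvAccept4]
      simp [hw]
    · have hw' : pvWsb c = false := by simpa using hw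
      by_cases hd : c = '-'
      · subst hd
        rw [List.foldl_cons, pvStep_dash34 3 (by omega), pvAccept5]
        simp [hw']
      · rw [List.foldl_cons, pvStep_other 3 c (by omega) hd hw', pvAccept5]
        simp [hw']

theorem pvAccept2 (l : List Char) :
    (l.foldl pvStep 2 == 3 || l.foldl pvStep 2 == 4) = pvDashRun 1 l := by
  cases l with
  | nil => rfl
  | cons c l =>
    by_cases hd : c = '-'
    · subst hd
      rw [List.foldl_cons, pvStep_dash 2 (by omega), show (2 : Int) + 1 = 3 by decide]
      rw [pvAccept3]
      simp [pvDashRun]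
    · rw [List.foldl_cons]
      have hrhs : pvDashRun 1 (c :: l) = false := by simp [pvDashRun, hd]
      rw [hrhs]
      by_cases hw : pvWsb c = true
      · rw [pvStep_ws12 2 c (by omega) hw, pvAccept5]
      · rw [pvStep_other 2 c (by omega) hd (by simpa using hw), pvAccept5]

theorem pvAccept1 (l : List Char) :
    (l.foldl pvStep 1 == 3 || l.foldl pvStep 1 == 4) = pvDashRun 2 l := by
  cases l with
  | nil => rfl
  | cons c l =>
    by_cases hd : c = '-'
    · subst hd
      rw [List.foldl_cons, pvStep_dash 1 (by omega), show (1 : Int) + 1 = 2 by decide,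
        pvAccept2]
      simp [pvDashRun]
    · rw [List.foldl_cons]
      have hrhs : pvDashRun 2 (c :: l) = false := by simp [pvDashRun, hd]
      rw [hrhs]
      by_cases hw : pvWsb c = true
      · rw [pvStep_ws12 1 c (by omega) hw, pvAccept5]
      · rw [pvStep_other 1 c (by omega) hd (by simpa using hw), pvAccept5]

theorem pvAccept0 (l : List Char) :
    (l.foldl pvStep 0 == 3 || l.foldl pvStep 0 == 4) = pvSepB l := by
  induction l with
  | nil => rfl
  | cons c l ih =>
    by_cases hw : pvWsb c = true
    · rw [List.foldl_cons, pvStep_ws 0 c (by omega) hw, ih]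
      simp only [pvSepB, List.dropWhile_cons_of_pos hw]
    · have hw' : pvWsb c = false := by simpa using hw
      rw [List.foldl_cons]
      have hdw : (c :: l).dropWhile pvWsb = c :: l :=
        List.dropWhile_cons_of_neg (by simp [hw'])
      by_cases hd : c = '-'
      · subst hd
        rw [pvStep_dash 0 (by omega), show (0 : Int) + 1 = 1 by decide, pvAccept1]
        simp only [pvSepB, hdw]
        simp [pvDashRun]
      · rw [pvStep_other 0 c (by omega) hd hw', pvAccept5]
        simp only [pvSepB, hdw]
        simp [pvDashRun, hd]

-- within Dom and off '\n', Python isspace coincides with pvWsb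
theorem pvIsspace_eq_wsb (c : Char) (hdom : pvDomChar c = true) (hnl : c ≠ '\n') :
    PySem.Chars.isspace c = pvWsb c := by
  have h10 : c.toNat ≠ 10 := fun hn => hnl (Char.ext (UInt32.toNat_inj.mp hn))
  simp only [pvDomChar, Bool.or_eq_true, Bool.and_eq_true, decide_eq_true_eq, beq_iff_eq]
    at hdom
  simp only [PySem.Chars.isspace, pvWsb, pvBeq_toNat]
  rw [Bool.eq_iff_iff]
  simp only [Bool.or_eq_true, Bool.and_eq_true, decide_eq_true_eq]
  have h32 : (' ' : Char).toNat = 32 := rfl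
  have h9 : ('\t' : Char).toNat = 9 := rfl
  have h13 : ('\r' : Char).toNat = 13 := rfl
  rw [h32, h9, h13]
  omega

-- the rstrip step: reverse-dropWhile-reverse equals '---' iff three dashes then ws
theorem pvRstrip_iff (m : List Char) :
    (m.reverse.dropWhile pvWsb).reverse = ['-', '-', '-'] ↔
      ∃ t, m = '-' :: '-' :: '-' :: t ∧ t.all pvWsb = true := by
  constructor
  · intro h
    have hd : m.reverse.dropWhile pvWsb = ['-', '-', '-'] := by
      have := congrArg List.reverse h; simpa using this
    refine ⟨(m.reverse.takeWhile pvWsb).reverse, ?_, ?_⟩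
    · have hsplit := List.takeWhile_append_dropWhile (p := pvWsb) (l := m.reverse)
      calc m = m.reverse.reverse := by simp
        _ = (m.reverse.takeWhile pvWsb ++ m.reverse.dropWhile pvWsb).reverse := by rw [hsplit]
        _ = '-' :: '-' :: '-' :: (m.reverse.takeWhile pvWsb).reverse := by
              rw [hd]; simp
    · rw [List.all_eq_true]
      intro x hx
      exact List.mem_takeWhile_imp (by simpa using hx)
  · rintro ⟨t, rfl, ht⟩
    have hrev : ('-' :: '-' :: '-' :: t).reverse = t.reverse ++ ['-', '-', '-'] := by simp
    rw [hrev, List.dropWhile_append]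
    have hnil : t.reverse.dropWhile pvWsb = [] := by
      rw [List.dropWhile_eq_nil_iff]
      intro x hx
      exact (List.all_eq_true.mp ht) x (by simpa using hx)
    rw [hnil]
    decide

-- if-form of pvSepB as an existential
theorem pvDashRun3_iff (m : List Char) :
    pvDashRun 3 m = true ↔ ∃ t, m = '-' :: '-' :: '-' :: t ∧ t.all pvWsb = true := by
  rcases m with _ | ⟨a, m⟩
  · simp [pvDashRun]
  rcases m with _ | ⟨b, m⟩
  · by_cases ha : a = '-' <;> simp [pvDashRun, ha]
  rcases m with _ | ⟨c, m⟩
  · by_cases ha : a = '-' <;> by_cases hb : b = '-' <;> simp [pvDashRun, ha, hb]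
  · constructor
    · intro h
      simp only [pvDashRun] at h
      by_cases ha : a = '-'
      · by_cases hb : b = '-'
        · by_cases hc : c = '-'
          · subst ha; subst hb; subst hc
            exact ⟨m, rfl, by simpa [pvDashRun] using h⟩
          · simp [ha, hb, hc] at h
        · simp [ha, hb] at h
      · simp [ha] at h
    · rintro ⟨t, heq, ht⟩
      injection heq with h1 heq; injection heq with h2 heq; injection heq with h3 heq
      subst h1; subst h2; subst h3; subst heq
      simpa [pvDashRun] using ht

theorem pvSepB_iff (m : List Char) :
    pvSepB m = true ↔
      ∃ t, m.dropWhile pvWsb = '-' :: '-' :: '-' :: t ∧ t.all pvWsb = true := by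
  unfold pvSepB
  exact pvDashRun3_iff _

-- strip l == "---" agrees with pvSepB (Dom chars, no '\n')
theorem pvStrip_eq_sep (l : List Char) (hdom : ∀ c ∈ l, pvDomChar c = true)
    (hnl : ∀ c ∈ l, c ≠ '\n') :
    (PySem.Chars.strip l == ['-', '-', '-']) = pvSepB l := by
  have hcongr : ∀ m : List Char, (∀ c ∈ m, c ∈ l) →
      m.dropWhile PySem.Chars.isspace = m.dropWhile pvWsb := by
    intro m hm
    induction m with
    | nil => rfl
    | cons c t ih =>
      have hcs : PySem.Chars.isspace c = pvWsb c :=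
        pvIsspace_eq_wsb c (hdom c (hm c (by simp))) (hnl c (hm c (by simp)))
      by_cases hw : pvWsb c = true
      · rw [List.dropWhile_cons_of_pos (hcs ▸ hw), List.dropWhile_cons_of_pos hw]
        exact ih (fun x hx => hm x (by simp [hx]))
      · rw [List.dropWhile_cons_of_neg (by simp [hcs, hw]),
            List.dropWhile_cons_of_neg (by simpa using hw)]
  unfold PySem.Chars.strip PySem.Chars.lstrip PySem.Chars.rstrip
  rw [hcongr l (fun c hc => hc)]
  rw [hcongr (l.dropWhile pvWsb).reverse
        (fun c hc => (List.dropWhile_sublist (p := pvWsb) (l := l)).mem (by simpa using hc))]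
  rw [Bool.eq_iff_iff, beq_iff_eq, pvRstrip_iff, pvSepB_iff]

-- main bridge: A's per-line loop over split('\n') = B's char loop
theorem pvMain (cs : List Char) (hdom : ∀ c ∈ cs, pvDomChar c = true) (i sepc di : Int) :
    pvALoop (pvSplitNL cs) i sepc di = pvBLoop cs (di - 1) sepc i 0 := by
  by_cases hnl : ∀ c ∈ cs, c ≠ '\n'
  · -- single line, no separator newline
    rw [pvSplitNL_no_nl cs hnl]
    have hB := pvBLoop_no_nl cs hnl [] (di - 1) sepc i 0
    rw [show cs ++ [] = cs by simp] at hB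
    rw [hB]
    simp only [pvALoop, pvBLoop]
    rw [pvStrip_eq_sep cs hdom hnl, ← pvAccept0]
    rcases Bool.eq_false_or_eq_true (cs.foldl pvStep 0 == 3 || cs.foldl pvStep 0 == 4)
        with hb | hb <;>
      rcases Bool.eq_false_or_eq_true (sepc == di - 1) with he | he <;>
        simp [hb, he]
  · -- split off the first line
    obtain ⟨c0, hc0m, hc0nl⟩ : ∃ c ∈ cs, c = '\n' := by
      simpa only [ne_eq, not_forall, not_not, exists_prop] using hnl
    set l := cs.takeWhile (fun c => c != '\n') with hl
    have hlnl : ∀ c ∈ l, c ≠ '\n' := by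
      intro c hc
      have := List.mem_takeWhile_imp (hl ▸ hc)
      simpa using this
    have hdrop_ne : cs.dropWhile (fun c => c != '\n') ≠ [] := by
      intro h
      have hall := List.dropWhile_eq_nil_iff.mp h c0 hc0m
      simp [hc0nl] at hall
    obtain ⟨d, rest, hdrop⟩ := List.exists_cons_of_ne_nil hdrop_ne
    have hdnl : d = '\n' := by
      have := List.head_dropWhile_not (p := fun c => c != '\n') (l := cs) (by simp [hdrop])
      simpa [hdrop] using this
    have hcs : cs = l ++ '\n' :: rest := by
      conv_lhs => rw [← List.takeWhile_append_dropWhile (p := fun c => c != '\n') (l := cs)]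
      rw [hdrop, hdnl]
    have hdom' : ∀ c ∈ rest, pvDomChar c = true := by
      intro c hc
      exact hdom c (by rw [hcs]; simp [hc])
    have hdoml : ∀ c ∈ l, pvDomChar c = true := by
      intro c hc
      exact hdom c (by rw [hcs]; simp [hc])
    rw [hcs, pvSplitNL_append_nl l rest hlnl, pvBLoop_no_nl l hlnl]
    simp only [pvALoop, pvBLoop, beq_self_eq_true, if_pos]
    rw [pvStrip_eq_sep l hdoml hlnl, ← pvAccept0]
    rcases Bool.eq_false_or_eq_true (l.foldl pvStep 0 == 3 || l.foldl pvStep 0 == 4)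
        with hb | hb
    · rw [if_pos hb, if_pos hb]
      by_cases he : (sepc == di - 1) = true
      · rw [if_pos he, if_pos he]
      · rw [if_neg (by simpa using he), if_neg (by simpa using he)]
        exact pvMain rest hdom' (i + 1) (sepc + 1) di
    · rw [if_neg (by simp [hb]), if_neg (by simp [hb])]
      exact pvMain rest hdom' (i + 1) sepc di
  termination_by cs.length
  decreasing_by
    all_goals
      rw [hcs]
      simp
      omega

-- ===== VERDICT (by name: the statement is the Claim_ definition above) =====
theorem find_document_start_py_spec : Claim_equal_find_document_start_py := by
  intro content doc_index hdom
  unfold Spec_find_document_start_py find_document_start_py find_document_start_py_alt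
  by_cases h0 : doc_index = 0
  · simp [h0]
  · rw [if_neg (by simpa using h0), if_neg (by simpa using h0)]
    rw [pvSplitOn_eq]
    have hall : ∀ c ∈ content.toList, pvDomChar c = true := by
      have hds : pvDomStr content = true := by
        unfold Dom_find_document_start_py at hdom
        simp only [Bool.and_eq_true] at hdom
        exact hdom.1
      intro c hc
      exact List.all_eq_true.mp (by simpa [pvDomStr] using hds) c hc
    exact pvMain content.toList hall 0 0 doc_index
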